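-- pv_equiv track=rewrite | github.com/nikita8/RelationalDB | input.py | isRhsPartialKey
-- ===== SOURCE A (Python) =====
-- def isRhsPartialKey(rhs,keys):
--     rhsKeyAttr = False
--     rhsAttrs = []
--     for k in keys:
--         for r in rhs:
--             if(r in k):
--                 rhsKeyAttr = True
--                 break
--
--     return rhsKeyAttr
-- ===== SOURCE B (Python) =====
-- def isRhsPartialKey(rhs, keys):
--     allAttrs = set()
--     for k in keys:
--         allAttrs.update(k)
--     return any(r in allAttrs for r in rhs)
-- ===== Notes on version B (the rewrite author's own statement) =====
-- stated objective: simpler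
-- what changed: Build one set of all key attributes in a single pass, then decide with a single any() over rhs, instead of re-scanning every key for each rhs element with a loop flag and break.
import Mathlib
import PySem

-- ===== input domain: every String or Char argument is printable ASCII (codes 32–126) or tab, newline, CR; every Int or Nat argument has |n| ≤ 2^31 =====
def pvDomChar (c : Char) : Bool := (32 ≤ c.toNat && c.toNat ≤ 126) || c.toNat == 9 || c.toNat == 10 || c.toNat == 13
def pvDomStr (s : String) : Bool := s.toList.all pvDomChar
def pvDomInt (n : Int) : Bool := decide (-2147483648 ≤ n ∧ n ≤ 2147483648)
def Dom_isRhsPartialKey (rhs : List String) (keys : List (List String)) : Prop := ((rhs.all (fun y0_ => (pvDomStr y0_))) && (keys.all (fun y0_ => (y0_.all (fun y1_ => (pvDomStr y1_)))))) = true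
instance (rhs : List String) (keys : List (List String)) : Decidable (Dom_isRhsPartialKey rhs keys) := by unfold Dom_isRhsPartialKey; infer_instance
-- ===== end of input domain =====

-- B replaces A's nested re-scan (flag + break) by one pass building the set of all key
-- attributes followed by a single membership pass over rhs (objective: simpler).

-- ===== PORT A =====
-- inner 'for r in rhs: if r in k: flag = True; break'
def pvInnerA (rhs : List String) (k : List String) (acc : Bool) : Bool :=
  match rhs with
  | [] => acc
  | r :: rest => if k.contains r then true else pvInnerA rest k acc

def isRhsPartialKey (rhs : List String) (keys : List (List String)) : Bool :=
  keys.foldl (fun rhsKeyAttr k => pvInnerA rhs k rhsKeyAttr) false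

-- ===== PORT B =====
-- B: one pass building the set of all key attributes, then a single membership pass over rhs.
def isRhsPartialKey_alt (rhs : List String) (keys : List (List String)) : Bool :=
  let allAttrs : PySem.Set String := keys.foldl (fun s k => PySem.Set.update s k) PySem.Set.empty
  rhs.any (fun r => PySem.Set.contains allAttrs r)

-- ===== PRECONDITION & SPEC =====
def Spec_isRhsPartialKey (rhs : List String) (keys : List (List String)) (out : Bool) : Prop := out = isRhsPartialKey_alt rhs keys
instance (rhs : List String) (keys : List (List String)) (out : Bool) : Decidable (Spec_isRhsPartialKey rhs keys out) := by unfold Spec_isRhsPartialKey; infer_instance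

-- ===== CLAIM (what is proved, stated in full; the proofs are below) =====
def Claim_equal_isRhsPartialKey : Prop := ∀ (rhs : List String) (keys : List (List String)), Dom_isRhsPartialKey rhs keys → Spec_isRhsPartialKey rhs keys (isRhsPartialKey rhs keys)

-- ===== LEMMAS AND PROOFS =====

lemma pvInnerA_eq (rhs k : List String) (acc : Bool) :
    pvInnerA rhs k acc = (rhs.any (fun r => k.contains r) || acc) := by
  induction rhs with
  | nil => simp [pvInnerA]
  | cons r rest ih =>
    unfold pvInnerA
    by_cases h : k.contains r <;> simp [h, ih, Bool.or_assoc]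

lemma foldl_innerA_eq (rhs : List String) (keys : List (List String)) (acc : Bool) :
    keys.foldl (fun a k => pvInnerA rhs k a) acc
      = (acc || keys.any (fun k => rhs.any (fun r => k.contains r))) := by
  induction keys generalizing acc with
  | nil => simp
  | cons k ks ih =>
    rw [List.foldl_cons, pvInnerA_eq, ih, List.any_cons]
    cases acc <;> simp [Bool.or_comm]

lemma isRhsPartialKey_eq_any (rhs : List String) (keys : List (List String)) :
    isRhsPartialKey rhs keys = keys.any (fun k => rhs.any (fun r => k.contains r)) := by
  unfold isRhsPartialKey
  simp [foldl_innerA_eq]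

lemma mem_foldl_update (keys : List (List String)) (s : PySem.Set String) (x : String) :
    x ∈ keys.foldl (fun s k => PySem.Set.update s k) s ↔ x ∈ s ∨ ∃ k ∈ keys, x ∈ k := by
  induction keys generalizing s with
  | nil => simp
  | cons k ks ih => simp [ih, PySem.Set.mem_update]; tauto

-- ===== VERDICT (by name: the statement is the Claim_ definition above) =====
theorem isRhsPartialKey_spec : Claim_equal_isRhsPartialKey := by
  intro rhs keys _
  unfold Spec_isRhsPartialKey isRhsPartialKey_alt
  rw [isRhsPartialKey_eq_any]
  simp only [List.any_eq, List.contains_iff_mem, PySem.Set.contains, decide_eq_true_eq,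
    mem_foldl_update, PySem.Set.empty, List.not_mem_nil, false_or]
  rw [decide_eq_decide]
  constructor
  · rintro ⟨k, hk, r, hr, hrk⟩; exact ⟨r, hr, k, hk, hrk⟩
  · rintro ⟨r, hr, k, hk, hrk⟩; exact ⟨k, hk, r, hr, hrk⟩
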